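-- pv_equiv track=rewrite | github.com/yakobsolo/Leetcode | 2861-maximum-number-of-alloys/2861-maximum-number-of-alloys.py | maxNumberOfAlloys
-- ===== SOURCE A (Python) =====
-- from typing import List
--
-- def maxNumberOfAlloys(n: int, k: int, budget: int, composition: List[List[int]], stock: List[int], cost: List[int]) -> int:
--     def isPossible(m, mt):
--         tot = 0
--         for i in range(n):
--             tot += max((composition[mt][i] * m - stock[i]) * cost[i] , 0)
--         return tot<=budget
--
--
--
--     def max_alloy_make(mt):
--         l, r = 0 , 10**16
--
--         while l<r:
--             mid = l+ (r-l+1)//2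
--
--
--             if isPossible(mid, mt):
--                 l=mid
--             else:
--                 r=mid-1
--         return l
--
--
--
--
--     max_alloy = 0
--     for machine_type in range(k):
--         max_alloy = max(max_alloy, max_alloy_make(machine_type))
--     return max_alloy
-- ===== SOURCE B (Python) =====
-- from typing import List
--
-- def maxNumberOfAlloys(n: int, k: int, budget: int, composition: List[List[int]], stock: List[int], cost: List[int]) -> int:
--     # Greedy bit-descent: build the answer from the top bit down.  A candidate m
--     # is feasible if ANY machine type can make m alloys within budget
--     # (short-circuits on the first type that fits).
--     CAP = 10 ** 16
--
--     def feasible(m):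
--         for mt in range(k):
--             total = 0
--             for i in range(n):
--                 need = composition[mt][i] * m - stock[i]
--                 if need > 0:
--                     total += need * cost[i]
--             if total <= budget:
--                 return True
--         return False
--
--     def go(e, ans):
--         if e < 0:
--             return ans
--         cand = ans + (1 << e)
--         if cand <= CAP and feasible(cand):
--             ans = cand
--         return go(e - 1, ans)
--
--     return go(53, 0)  # 2**54 > CAP, so bits 53..0 reach every value up to CAP
-- ===== Notes on version B (the rewrite author's own statement) =====
-- stated objective: alternative
-- what changed: A runs a separate (l,r)-interval binary search for every machine type and folds the maxima; B has no interval loop at all: it greedily builds the answer bit by bit from 2^53 down, testing each candidate with a single 'does ANY machine type fit the budget' predicate that short-circuits on the first fitting type.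
-- outside the precondition, e.g. on maxNumberOfAlloys(1, 1, 4, [[-2]], [1], [-2]): A returns 0, B returns 10000000000000000
import Mathlib
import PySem

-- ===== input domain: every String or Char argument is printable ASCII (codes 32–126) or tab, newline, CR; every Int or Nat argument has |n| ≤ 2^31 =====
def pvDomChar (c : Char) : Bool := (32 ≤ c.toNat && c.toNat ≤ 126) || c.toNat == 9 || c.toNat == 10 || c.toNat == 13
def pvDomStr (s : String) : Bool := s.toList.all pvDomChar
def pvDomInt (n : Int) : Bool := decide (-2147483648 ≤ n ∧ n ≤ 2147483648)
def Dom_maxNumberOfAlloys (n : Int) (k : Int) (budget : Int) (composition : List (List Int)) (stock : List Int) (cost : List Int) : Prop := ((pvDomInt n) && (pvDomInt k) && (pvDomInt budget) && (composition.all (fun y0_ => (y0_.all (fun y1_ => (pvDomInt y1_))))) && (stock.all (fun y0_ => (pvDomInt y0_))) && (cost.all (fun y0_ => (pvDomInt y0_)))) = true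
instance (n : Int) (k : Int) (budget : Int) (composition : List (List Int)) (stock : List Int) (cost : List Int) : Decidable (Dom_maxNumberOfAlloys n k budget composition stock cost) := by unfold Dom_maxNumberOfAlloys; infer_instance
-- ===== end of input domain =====

-- B replaces A's k per-machine interval binary searches by a single greedy bit-descent
-- over the answer, whose feasibility check asks whether ANY machine type fits the budget
-- (objective: alternative).

-- ===== PORT A =====
-- list indexing: inside Pre_ every index is a valid nonnegative index, where pyGetD
-- coincides exactly with Python's xs[i]
def pvTotA (n : Int) (composition : List (List Int)) (stock : List Int) (cost : List Int) (m : Int) (mt : Int) : Int :=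
  (PySem.List.pyRange 0 n 1).foldl
    (fun tot i =>
      tot + max ((PySem.List.pyGetD (PySem.List.pyGetD composition mt []) i 0 * m
                   - PySem.List.pyGetD stock i 0) * PySem.List.pyGetD cost i 0) 0) 0

def pvIsPossibleA (n : Int) (budget : Int) (composition : List (List Int)) (stock : List Int) (cost : List Int) (m : Int) (mt : Int) : Bool :=
  decide (pvTotA n composition stock cost m mt ≤ budget)

-- the while loop, as structural recursion on a fuel counting the loop bound r-l
-- (each pass shrinks r-l by at least 1, so (r-l).toNat passes suffice)
def pvMaxAlloyMakeAGo (n : Int) (budget : Int) (composition : List (List Int)) (stock : List Int) (cost : List Int) (mt : Int) : Nat → Int → Int → Int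
  | 0, l, _ => l
  | Nat.succ fuel, l, r =>
    if l < r then
      let mid := l + PySem.Int.floordiv (r - l + 1) 2
      if pvIsPossibleA n budget composition stock cost mid mt then
        pvMaxAlloyMakeAGo n budget composition stock cost mt fuel mid r
      else
        pvMaxAlloyMakeAGo n budget composition stock cost mt fuel l (mid - 1)
    else l

def pvMaxAlloyMakeA (n : Int) (budget : Int) (composition : List (List Int)) (stock : List Int) (cost : List Int) (mt : Int) : Int :=
  pvMaxAlloyMakeAGo n budget composition stock cost mt
    (10000000000000000 : Int).toNat 0 10000000000000000

def maxNumberOfAlloys (n : Int) (k : Int) (budget : Int) (composition : List (List Int)) (stock : List Int) (cost : List Int) : Int :=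
  (PySem.List.pyRange 0 k 1).foldl
    (fun max_alloy machine_type =>
      max max_alloy (pvMaxAlloyMakeA n budget composition stock cost machine_type))
    0

-- ===== PORT B =====
def pvTotB (n : Int) (composition : List (List Int)) (stock : List Int) (cost : List Int) (mt : Int) (m : Int) : Int :=
  (PySem.List.pyRange 0 n 1).foldl
    (fun total i =>
      let need := PySem.List.pyGetD (PySem.List.pyGetD composition mt []) i 0 * m
                   - PySem.List.pyGetD stock i 0
      if 0 < need then total + need * PySem.List.pyGetD cost i 0 else total) 0

-- `for mt in range(k): … return True / return False` = short-circuit any over the range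
def pvFeasibleB (n : Int) (k : Int) (budget : Int) (composition : List (List Int)) (stock : List Int) (cost : List Int) (m : Int) : Bool :=
  (PySem.List.pyRange 0 k 1).any
    (fun mt => decide (pvTotB n composition stock cost mt m ≤ budget))

-- B's recursive bit-descent go(e, ans); Python's e ≥ 0 with base case e < 0 becomes a
-- Nat argument (Nat.succ e ↔ Python's exponent e, 0 ↔ the e < 0 base case); 1 << e = 2^e
def pvGoB (n : Int) (k : Int) (budget : Int) (composition : List (List Int)) (stock : List Int) (cost : List Int) : Nat → Int → Int
  | 0, ans => ans
  | Nat.succ e, ans =>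
    let cand := ans + 2 ^ e
    pvGoB n k budget composition stock cost e
      (if cand ≤ 10000000000000000 ∧ pvFeasibleB n k budget composition stock cost cand = true
       then cand else ans)

def maxNumberOfAlloys_alt (n : Int) (k : Int) (budget : Int) (composition : List (List Int)) (stock : List Int) (cost : List Int) : Int :=
  pvGoB n k budget composition stock cost 54 0   -- go(53, 0)

-- ===== PRECONDITION & SPEC =====
-- Pre_ excludes the inputs on which A raises IndexError (k rows / n columns or n stock or
-- cost entries not actually present while k > 0), and inputs with a negative composition
-- or cost entry among the used ones, on which the cost total is not monotone in m and the
-- value a search settles on is an accident of its probe sequence.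
def Pre_maxNumberOfAlloys (n : Int) (k : Int) (budget : Int) (composition : List (List Int)) (stock : List Int) (cost : List Int) : Prop :=
  0 < k → (k ≤ (composition.length : Int) ∧
    (0 < n → n ≤ (stock.length : Int) ∧ n ≤ (cost.length : Int) ∧
      (∀ c ∈ cost.take n.toNat, 0 ≤ c) ∧
      (∀ row ∈ composition.take k.toNat,
        n ≤ (row.length : Int) ∧ ∀ x ∈ row.take n.toNat, 0 ≤ x)))

instance (n : Int) (k : Int) (budget : Int) (composition : List (List Int)) (stock : List Int) (cost : List Int) : Decidable (Pre_maxNumberOfAlloys n k budget composition stock cost) := by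
  unfold Pre_maxNumberOfAlloys; infer_instance

def pvWitness_maxNumberOfAlloys : Int × Int × Int × List (List Int) × List Int × List Int :=
  (2, 2, 15, [[1, 1], [1, 2]], [0, 0], [1, 2])

def Spec_maxNumberOfAlloys (n : Int) (k : Int) (budget : Int) (composition : List (List Int)) (stock : List Int) (cost : List Int) (out : Int) : Prop := out = maxNumberOfAlloys_alt n k budget composition stock cost
instance (n : Int) (k : Int) (budget : Int) (composition : List (List Int)) (stock : List Int) (cost : List Int) (out : Int) : Decidable (Spec_maxNumberOfAlloys n k budget composition stock cost out) := by unfold Spec_maxNumberOfAlloys; infer_instance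

-- ===== CLAIM (what is proved, stated in full; the proofs are below) =====
def Claim_equal_maxNumberOfAlloys : Prop := ∀ (n : Int) (k : Int) (budget : Int) (composition : List (List Int)) (stock : List Int) (cost : List Int), Dom_maxNumberOfAlloys n k budget composition stock cost → Pre_maxNumberOfAlloys n k budget composition stock cost → Spec_maxNumberOfAlloys n k budget composition stock cost (maxNumberOfAlloys n k budget composition stock cost)

-- ===== LEMMAS AND PROOFS =====

theorem pvWitness_ok :
    Dom_maxNumberOfAlloys pvWitness_maxNumberOfAlloys.1 pvWitness_maxNumberOfAlloys.2.1
      pvWitness_maxNumberOfAlloys.2.2.1 pvWitness_maxNumberOfAlloys.2.2.2.1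
      pvWitness_maxNumberOfAlloys.2.2.2.2.1 pvWitness_maxNumberOfAlloys.2.2.2.2.2 ∧
    Pre_maxNumberOfAlloys pvWitness_maxNumberOfAlloys.1 pvWitness_maxNumberOfAlloys.2.1
      pvWitness_maxNumberOfAlloys.2.2.1 pvWitness_maxNumberOfAlloys.2.2.2.1
      pvWitness_maxNumberOfAlloys.2.2.2.2.1 pvWitness_maxNumberOfAlloys.2.2.2.2.2 := by
  decide

-- the shared search bound
def pvR : Int := 10000000000000000

-- the property both searches' results satisfy (unique, by pvC_uniq)
def pvC (P : Int → Bool) (x : Int) : Prop :=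
  0 ≤ x ∧ x ≤ pvR ∧ (x = 0 ∨ P x = true) ∧ ∀ m : Int, x < m → m ≤ pvR → P m = false

theorem pvC_uniq (P : Int → Bool) (x y : Int) (hx : pvC P x) (hy : pvC P y) : x = y := by
  obtain ⟨hx0, hxR, hxP, hxA⟩ := hx
  obtain ⟨hy0, hyR, hyP, hyA⟩ := hy
  by_contra hne
  rcases lt_or_gt_of_ne hne with h | h
  · have hf := hxA y h hyR
    rcases hyP with h0 | hP
    · omega
    · rw [hP] at hf; cases hf
  · have hf := hyA x h hxR
    rcases hxP with h0 | hP
    · omega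
    · rw [hP] at hf; cases hf

-- A's loop with its predicate abstracted, to state the invariant once
def pvBSGo (P : Int → Bool) : Nat → Int → Int → Int
  | 0, l, _ => l
  | Nat.succ fuel, l, r =>
    if l < r then
      if P (l + PySem.Int.floordiv (r - l + 1) 2) then
        pvBSGo P fuel (l + PySem.Int.floordiv (r - l + 1) 2) r
      else
        pvBSGo P fuel l (l + PySem.Int.floordiv (r - l + 1) 2 - 1)
    else l

theorem pvMaxAlloyMakeA_eq_pvBSGo (n budget : Int) (composition : List (List Int)) (stock cost : List Int) (mt : Int) :
    ∀ fuel : Nat, ∀ l r : Int,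
      pvMaxAlloyMakeAGo n budget composition stock cost mt fuel l r =
        pvBSGo (fun m => pvIsPossibleA n budget composition stock cost m mt) fuel l r := by
  intro fuel
  induction fuel with
  | zero => intro l r; rfl
  | succ f ih =>
    intro l r
    simp only [pvMaxAlloyMakeAGo, pvBSGo, ih]

theorem pvBSGo_spec (P : Int → Bool)
    (hmono : ∀ a b : Int, a ≤ b → P b = true → P a = true) :
    ∀ fuel : Nat, ∀ l r : Int, (r - l).toNat ≤ fuel →
      0 ≤ l → l ≤ r → r ≤ pvR → (l = 0 ∨ P l = true) →
      (∀ m : Int, r < m → m ≤ pvR → P m = false) →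
      pvC P (pvBSGo P fuel l r) := by
  intro fuel
  induction fuel with
  | zero =>
    intro l r hf h0 hlr hR hP hA
    have hleqr : l = r := by omega
    subst hleqr
    exact ⟨h0, hR, hP, hA⟩
  | succ f ih =>
    intro l r hf h0 hlr hR hP hA
    simp only [pvBSGo]
    by_cases h1 : l < r
    · rw [if_pos h1]
      have hdiv : PySem.Int.floordiv (r - l + 1) 2 = (r - l + 1) / 2 :=
        PySem.Int.floordiv_eq_ediv_of_pos (by norm_num)
      set mid := l + PySem.Int.floordiv (r - l + 1) 2 with hmiddef
      have hmb : l < mid ∧ mid ≤ r := by rw [hmiddef, hdiv]; omega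
      by_cases hPm : P mid = true
      · rw [if_pos hPm]
        exact ih mid r (by omega) (by omega) (by omega) hR (Or.inr hPm) hA
      · rw [if_neg hPm]
        refine ih l (mid - 1) (by omega) h0 (by omega) (by omega) hP ?_
        intro m hm hmR
        by_cases hmr : m ≤ r
        · by_contra hPmT
          have : P m = true := by
            cases hPmm : P m
            · exact absurd hPmm hPmT
            · rfl
          exact hPm (hmono mid m (by omega) this)
        · exact hA m (by omega) hmR
    · rw [if_neg h1]
      have hleqr : l = r := by omega
      subst hleqr
      exact ⟨h0, hR, hP, hA⟩

-- B's bit-descent with its predicate abstracted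
def pvBitGo (P : Int → Bool) : Nat → Int → Int
  | 0, ans => ans
  | Nat.succ e, ans =>
    let cand := ans + 2 ^ e
    pvBitGo P e (if cand ≤ pvR ∧ P cand = true then cand else ans)

theorem pvGoB_eq_pvBitGo (n k budget : Int) (composition : List (List Int)) (stock cost : List Int) :
    ∀ e : Nat, ∀ ans : Int,
      pvGoB n k budget composition stock cost e ans =
        pvBitGo (pvFeasibleB n k budget composition stock cost) e ans := by
  intro e
  induction e with
  | zero => intro ans; rfl
  | succ f ih =>
    intro ans
    simp only [pvGoB, pvBitGo, pvR, ih]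
    rfl

theorem pvBitGo_spec (P : Int → Bool)
    (hmono : ∀ a b : Int, a ≤ b → P b = true → P a = true) :
    ∀ e : Nat, ∀ ans : Int,
      0 ≤ ans → ans ≤ pvR → (ans = 0 ∨ P ans = true) →
      (∀ m : Int, ans + 2 ^ e ≤ m → m ≤ pvR → P m = false) →
      pvC P (pvBitGo P e ans) := by
  intro e
  induction e with
  | zero =>
    intro ans h0 hR hP hA
    simp only [pvBitGo]
    have h1 : (2:Int) ^ (0:Nat) = 1 := pow_zero 2
    exact ⟨h0, hR, hP, fun m hm hmR => hA m (by omega) hmR⟩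
  | succ f ih =>
    intro ans h0 hR hP hA
    simp only [pvBitGo]
    have hpow : (0:Int) < 2 ^ f := pow_pos (by norm_num) f
    have hsucc : (2:Int) ^ (f + 1) = 2 ^ f + 2 ^ f := by ring
    rw [hsucc] at hA
    by_cases hc : ans + 2 ^ f ≤ pvR ∧ P (ans + 2 ^ f) = true
    · rw [if_pos hc]
      refine ih (ans + 2 ^ f) (by omega) hc.1 (Or.inr hc.2) ?_
      intro m hm hmR
      exact hA m (by omega) hmR
    · rw [if_neg hc]
      refine ih ans h0 hR hP ?_
      intro m hm hmR
      by_cases hbig : ans + (2 ^ f + 2 ^ f) ≤ m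
      · exact hA m hbig hmR
      · rcases not_and_or.mp hc with hcap | hPc
        · omega
        · by_contra hPmT
          have hPm : P m = true := by
            cases hPmm : P m
            · exact absurd hPmm hPmT
            · rfl
          exact hPc (hmono (ans + 2 ^ f) m (by omega) hPm)

-- additive foldl over a list: monotone / congruent in the added term
theorem pvFoldlAdd_mono (L : List Int) (f g : Int → Int)
    (h : ∀ i ∈ L, f i ≤ g i) :
    ∀ c d : Int, c ≤ d →
      L.foldl (fun t i => t + f i) c ≤ L.foldl (fun t i => t + g i) d := by
  induction L with
  | nil => intro c d hcd; simpa using hcd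
  | cons x xs ih =>
    intro c d hcd
    simp only [List.foldl_cons]
    exact ih (fun i hi => h i (List.mem_cons_of_mem _ hi)) _ _
      (add_le_add hcd (h x (List.mem_cons_self)))

theorem pvFoldlAdd_congr (L : List Int) (f g : Int → Int)
    (h : ∀ i ∈ L, f i = g i) :
    ∀ c : Int, L.foldl (fun t i => t + f i) c = L.foldl (fun t i => t + g i) c := by
  induction L with
  | nil => intro c; rfl
  | cons x xs ih =>
    intro c
    simp only [List.foldl_cons, h x List.mem_cons_self]
    exact ih (fun i hi => h i (List.mem_cons_of_mem _ hi)) _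

-- B's conditional accumulation is the additive shape
theorem pvFoldlIf_eq_add (L : List Int) (need w : Int → Int) :
    ∀ c : Int,
      L.foldl (fun t i => if 0 < need i then t + need i * w i else t) c =
      L.foldl (fun t i => t + (if 0 < need i then need i * w i else 0)) c := by
  induction L with
  | nil => intro c; rfl
  | cons x xs ih =>
    intro c
    simp only [List.foldl_cons]
    by_cases h : 0 < need x <;> simp [h, ih]

-- membership of the accessed entries in the guarded prefixes
theorem pvMemTake {α : Type} (xs : List α) (i nn : Nat) (hin : i < nn) (hlen : i < xs.length) :
    xs[i] ∈ xs.take nn := by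
  have hlt : i < (xs.take nn).length := by simp [hin, hlen]
  have : (xs.take nn)[i]'hlt = xs[i] := List.getElem_take
  rw [← this]
  exact List.getElem_mem _

-- the per-type totals of A and B agree and are monotone in m, given Pre_
theorem pvEntries (n k : Int) (budget : Int) (composition : List (List Int)) (stock cost : List Int)
    (hpre : Pre_maxNumberOfAlloys n k budget composition stock cost)
    (mt : Int) (hmt0 : 0 ≤ mt) (hmtk : mt < k) (i : Int) (hi0 : 0 ≤ i) (hin : i < n) :
    0 ≤ PySem.List.pyGetD (PySem.List.pyGetD composition mt []) i 0 ∧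
    0 ≤ PySem.List.pyGetD cost i 0 := by
  obtain ⟨hkc, hrest⟩ := hpre (by omega)
  obtain ⟨hsl, hcl, hcnn, hrows⟩ := hrest (by omega)
  have hmtlen : mt < (composition.length : Int) := by omega
  have hrow : PySem.List.pyGetD composition mt [] = composition[mt.toNat]'(by omega) :=
    PySem.List.pyGetD_eq_getElem composition [] (by omega) hmtlen
  have hrowmem : composition[mt.toNat]'(by omega) ∈ composition.take k.toNat :=
    pvMemTake composition mt.toNat k.toNat (by omega) (by omega)
  obtain ⟨hrlen, hrnn⟩ := hrows _ hrowmem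
  constructor
  · rw [hrow]
    have hilen : i < ((composition[mt.toNat]'(by omega)).length : Int) := by omega
    rw [PySem.List.pyGetD_eq_getElem _ 0 hi0 hilen]
    exact hrnn _ (pvMemTake _ i.toNat n.toNat (by omega) (by omega))
  · have hilen : i < (cost.length : Int) := by omega
    rw [PySem.List.pyGetD_eq_getElem cost 0 hi0 hilen]
    exact hcnn _ (pvMemTake cost i.toNat n.toNat (by omega) (by omega))

theorem pvTot_eq (n k : Int) (budget : Int) (composition : List (List Int)) (stock cost : List Int)
    (hpre : Pre_maxNumberOfAlloys n k budget composition stock cost)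
    (mt : Int) (hmt0 : 0 ≤ mt) (hmtk : mt < k) (m : Int) :
    pvTotB n composition stock cost mt m = pvTotA n composition stock cost m mt := by
  unfold pvTotA pvTotB
  rw [pvFoldlIf_eq_add]
  refine pvFoldlAdd_congr _ _ _ ?_ 0
  intro i hi
  have hmem := PySem.List.mem_pyRange_one.mp hi
  obtain ⟨hc, hw⟩ := pvEntries n k budget composition stock cost hpre mt hmt0 hmtk i hmem.1 hmem.2
  set need := PySem.List.pyGetD (PySem.List.pyGetD composition mt []) i 0 * m
                - PySem.List.pyGetD stock i 0
  by_cases h : 0 < need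
  · rw [if_pos h, max_eq_left (mul_nonneg (by omega) hw)]
  · rw [if_neg h, max_eq_right (mul_nonpos_of_nonpos_of_nonneg (by omega) hw)]

theorem pvTotA_mono (n k : Int) (budget : Int) (composition : List (List Int)) (stock cost : List Int)
    (hpre : Pre_maxNumberOfAlloys n k budget composition stock cost)
    (mt : Int) (hmt0 : 0 ≤ mt) (hmtk : mt < k) (a b : Int) (hab : a ≤ b) :
    pvTotA n composition stock cost a mt ≤ pvTotA n composition stock cost b mt := by
  unfold pvTotA
  refine pvFoldlAdd_mono _ _ _ ?_ 0 0 le_rfl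
  intro i hi
  have hmem := PySem.List.mem_pyRange_one.mp hi
  obtain ⟨hc, hw⟩ := pvEntries n k budget composition stock cost hpre mt hmt0 hmtk i hmem.1 hmem.2
  refine max_le_max ?_ le_rfl
  have : PySem.List.pyGetD (PySem.List.pyGetD composition mt []) i 0 * a
        ≤ PySem.List.pyGetD (PySem.List.pyGetD composition mt []) i 0 * b :=
    mul_le_mul_of_nonneg_left hab hc
  exact mul_le_mul_of_nonneg_right (by omega) hw

theorem pvIsPossibleA_mono (n k : Int) (budget : Int) (composition : List (List Int)) (stock cost : List Int)
    (hpre : Pre_maxNumberOfAlloys n k budget composition stock cost)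
    (mt : Int) (hmt0 : 0 ≤ mt) (hmtk : mt < k) (a b : Int) (hab : a ≤ b)
    (hb : pvIsPossibleA n budget composition stock cost b mt = true) :
    pvIsPossibleA n budget composition stock cost a mt = true := by
  unfold pvIsPossibleA at *
  have hmono := pvTotA_mono n k budget composition stock cost hpre mt hmt0 hmtk a b hab
  simp only [decide_eq_true_eq] at *
  omega

theorem pvFeasibleB_mono (n k : Int) (budget : Int) (composition : List (List Int)) (stock cost : List Int)
    (hpre : Pre_maxNumberOfAlloys n k budget composition stock cost)
    (a b : Int) (hab : a ≤ b)
    (hb : pvFeasibleB n k budget composition stock cost b = true) :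
    pvFeasibleB n k budget composition stock cost a = true := by
  unfold pvFeasibleB at *
  rw [List.any_eq_true] at *
  obtain ⟨mt, hmem, hmt⟩ := hb
  obtain ⟨hmt0, hmtk⟩ := PySem.List.mem_pyRange_one.mp hmem
  refine ⟨mt, hmem, ?_⟩
  rw [pvTot_eq n k budget composition stock cost hpre mt hmt0 hmtk] at *
  simp only [decide_eq_true_eq] at *
  have := pvTotA_mono n k budget composition stock cost hpre mt hmt0 hmtk a b hab
  omega

-- foldl-max facts
theorem pvFoldlMax_init_le (L : List Int) (f : Int → Int) :
    ∀ a : Int, a ≤ L.foldl (fun acc mt => max acc (f mt)) a := by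
  induction L with
  | nil => intro a; simp
  | cons x xs ih =>
    intro a
    simp only [List.foldl_cons]
    exact le_trans (le_max_left a (f x)) (ih _)

theorem pvFoldlMax_mem (L : List Int) (f : Int → Int) :
    ∀ a : Int, L.foldl (fun acc mt => max acc (f mt)) a = a ∨
      ∃ mt ∈ L, L.foldl (fun acc mt => max acc (f mt)) a = f mt := by
  induction L with
  | nil => intro a; left; rfl
  | cons x xs ih =>
    intro a
    simp only [List.foldl_cons]
    rcases ih (max a (f x)) with h | ⟨mt, hmem, h⟩
    · rcases max_choice a (f x) with hm | hm
      · left; rw [h, hm]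
      · right; exact ⟨x, List.mem_cons_self, by rw [h, hm]⟩
    · right; exact ⟨mt, List.mem_cons_of_mem _ hmem, h⟩

theorem pvLe_foldlMax (L : List Int) (f : Int → Int) :
    ∀ a : Int, ∀ mt ∈ L, f mt ≤ L.foldl (fun acc mt => max acc (f mt)) a := by
  induction L with
  | nil => intro a mt h; cases h
  | cons x xs ih =>
    intro a mt hmem
    simp only [List.foldl_cons]
    rcases List.mem_cons.mp hmem with rfl | h
    · exact le_trans (le_max_right a (f mt)) (pvFoldlMax_init_le xs f _)
    · exact ih _ mt h

-- A's fold of per-type binary-search maxima and B's bit-descent both satisfy pvC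
theorem main_equiv (n k : Int) (budget : Int) (composition : List (List Int)) (stock cost : List Int)
    (hpre : Pre_maxNumberOfAlloys n k budget composition stock cost) :
    maxNumberOfAlloys n k budget composition stock cost =
      maxNumberOfAlloys_alt n k budget composition stock cost := by
  set PA := fun mt => (fun m => pvIsPossibleA n budget composition stock cost m mt) with hPA
  set Q := pvFeasibleB n k budget composition stock cost with hQ
  set L := PySem.List.pyRange 0 k 1 with hL
  set x := fun mt => pvBSGo (PA mt) pvR.toNat 0 pvR with hx
  have hA : maxNumberOfAlloys n k budget composition stock cost =
      L.foldl (fun acc mt => max acc (x mt)) 0 := by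
    unfold maxNumberOfAlloys pvMaxAlloyMakeA
    simp only [pvMaxAlloyMakeA_eq_pvBSGo, hx, hPA, pvR, hL]
  have hCx : ∀ mt ∈ L, pvC (PA mt) (x mt) := by
    intro mt hmem
    obtain ⟨hmt0, hmtk⟩ := PySem.List.mem_pyRange_one.mp hmem
    exact pvBSGo_spec (PA mt)
      (fun a b hab hb => pvIsPossibleA_mono n k budget composition stock cost hpre mt hmt0 hmtk a b hab hb)
      pvR.toNat 0 pvR (by norm_num [pvR]) (by norm_num [pvR]) (by norm_num [pvR]) le_rfl
      (Or.inl rfl) (fun m h1 h2 => by omega)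
  set z := L.foldl (fun acc mt => max acc (x mt)) 0 with hz
  have hCz : pvC Q z := by
    refine ⟨pvFoldlMax_init_le L x 0, ?_, ?_, ?_⟩
    · rcases pvFoldlMax_mem L x 0 with h | ⟨mt, hmem, h⟩
      · rw [← hz] at h; rw [h]; norm_num [pvR]
      · rw [← hz] at h; rw [h]; exact (hCx mt hmem).2.1
    · rcases pvFoldlMax_mem L x 0 with h | ⟨mt, hmem, h⟩
      · left; rw [← hz] at h; exact h
      · rw [← hz] at h
        rcases (hCx mt hmem).2.2.1 with h0 | hP
        · left; omega
        · right
          obtain ⟨hmt0, hmtk⟩ := PySem.List.mem_pyRange_one.mp hmem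
          rw [hQ]; unfold pvFeasibleB
          rw [List.any_eq_true]
          refine ⟨mt, hmem, ?_⟩
          rw [pvTot_eq n k budget composition stock cost hpre mt hmt0 hmtk]
          rw [h]
          exact hP
    · intro m hm hmR
      rw [hQ]; unfold pvFeasibleB
      rw [List.any_eq_false]
      intro mt hmem
      obtain ⟨hmt0, hmtk⟩ := PySem.List.mem_pyRange_one.mp hmem
      rw [pvTot_eq n k budget composition stock cost hpre mt hmt0 hmtk]
      have hle : x mt ≤ z := pvLe_foldlMax L x 0 mt hmem
      have hfalse := (hCx mt hmem).2.2.2 m (by omega) hmR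
      simp only [hPA] at hfalse
      unfold pvIsPossibleA at hfalse
      simp only [decide_eq_false_iff_not] at hfalse
      simp only [decide_eq_true_eq]
      exact hfalse
  have hCB : pvC Q (pvBitGo Q 54 0) := by
    refine pvBitGo_spec Q
      (fun a b hab hb => pvFeasibleB_mono n k budget composition stock cost hpre a b hab hb)
      54 0 le_rfl (by norm_num [pvR]) (Or.inl rfl) ?_
    intro m hm hmR
    have : (2:Int) ^ (54:Nat) = 18014398509481984 := by norm_num
    rw [this] at hm
    simp only [pvR] at hmR
    omega
  have hB : maxNumberOfAlloys_alt n k budget composition stock cost = pvBitGo Q 54 0 := by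
    unfold maxNumberOfAlloys_alt
    rw [pvGoB_eq_pvBitGo]
  rw [hA, hB]
  exact pvC_uniq Q z (pvBitGo Q 54 0) hCz hCB

-- ===== VERDICT (by name: the statement is the Claim_ definition above) =====
theorem maxNumberOfAlloys_spec : Claim_equal_maxNumberOfAlloys := by
  intro n k budget composition stock cost _hdom hpre
  unfold Spec_maxNumberOfAlloys
  exact main_equiv n k budget composition stock cost hpre
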